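-- pv_equiv track=rewrite | github.com/mjalkio/advent-of-code | year_2020/day04/passport_processing.py | passport_batch_to_tuple
-- ===== SOURCE A (Python) =====
-- def passport_batch_to_tuple(passport_batch):
--     # Two newlines in a row mean there was a blank line
--     passports = passport_batch.split('\n\n')
--     return tuple(
--         passport.replace('\n', ' ').strip()
--         for passport
--         in passports
--         if passport != ''
--     )
-- ===== SOURCE B (Python) =====
-- def passport_batch_to_tuple(passport_batch):
--     # One pass over the characters: a run of two newlines closes the current
--     # passport; a lone newline becomes a space; empty pieces are dropped.
--     out = []
--     piece = []
--     run = 0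
--     for c in passport_batch:
--         if c == '\n':
--             run += 1
--             if run == 2:
--                 if piece:
--                     out.append(''.join(piece).strip())
--                 piece = []
--                 run = 0
--         else:
--             if run == 1:
--                 piece.append(' ')
--                 run = 0
--             piece.append(c)
--     if run == 1:
--         piece.append(' ')
--     if piece:
--         out.append(''.join(piece).strip())
--     return tuple(out)
-- ===== Notes on version B (the rewrite author's own statement) =====
-- stated objective: alternative
-- what changed: Replaces A's blank-line split followed by a per-piece newline-to-space replace and strip with a single character-by-character state machine (newline-run counter plus current-piece buffer) that emits each passport in one pass.
import Mathlib
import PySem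

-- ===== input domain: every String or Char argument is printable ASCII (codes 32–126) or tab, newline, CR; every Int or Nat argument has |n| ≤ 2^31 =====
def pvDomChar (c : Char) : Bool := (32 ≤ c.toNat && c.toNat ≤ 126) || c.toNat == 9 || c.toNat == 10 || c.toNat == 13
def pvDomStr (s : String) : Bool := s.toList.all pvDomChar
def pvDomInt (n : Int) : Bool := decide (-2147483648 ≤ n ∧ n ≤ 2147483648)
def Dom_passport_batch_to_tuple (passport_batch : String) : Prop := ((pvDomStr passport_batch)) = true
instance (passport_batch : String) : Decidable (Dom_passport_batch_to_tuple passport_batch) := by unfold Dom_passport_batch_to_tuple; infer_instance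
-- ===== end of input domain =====

-- B replaces A's blank-line-split + per-piece replace/strip pipeline by a single
-- character-by-character state machine (newline-run counter + piece buffer);
-- objective: alternative decomposition, same exact behaviour.


-- ===== PORT A =====
-- passports = passport_batch.split on double newline; map replace-newline-with-space then strip, keeping pieces that are non-empty before the strip
def passport_batch_to_tuple (passport_batch : String) : List String :=
  let passports := PySem.Chars.splitOn passport_batch.toList ['\n', '\n']
  (passports.filter (fun p => p ≠ [])).map
    (fun p => String.ofList (PySem.Chars.strip (PySem.Chars.replace p ['\n'] [' '])))

-- ===== PORT B =====
-- loop body of Source B: state (out, piece, run)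
def pvAltStep (st : List String × List Char × Nat) (c : Char) :
    List String × List Char × Nat :=
  let (out, piece, run) := st
  if c = '\n' then
    let run := run + 1
    if run = 2 then
      (if piece ≠ [] then out ++ [String.ofList (PySem.Chars.strip piece)] else out, [], 0)
    else (out, piece, run)
  else
    if run = 1 then (out, piece ++ [' ', c], 0)
    else (out, piece ++ [c], run)

-- code after Source B's loop: flush a pending lone newline and the last piece
def pvAltFinal (st : List String × List Char × Nat) : List String :=
  let (out, piece, run) := st
  let piece := if run = 1 then piece ++ [' '] else piece
  if piece ≠ [] then out ++ [String.ofList (PySem.Chars.strip piece)] else out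

def passport_batch_to_tuple_alt (passport_batch : String) : List String :=
  pvAltFinal (passport_batch.toList.foldl pvAltStep ([], [], 0))

-- ===== PRECONDITION & SPEC =====
def Spec_passport_batch_to_tuple (passport_batch : String) (out : List String) : Prop := out = passport_batch_to_tuple_alt passport_batch
instance (passport_batch : String) (out : List String) : Decidable (Spec_passport_batch_to_tuple passport_batch out) := by unfold Spec_passport_batch_to_tuple; infer_instance

-- ===== CLAIM (what is proved, stated in full; the proofs are below) =====
def Claim_equal_passport_batch_to_tuple : Prop := ∀ (passport_batch : String), Dom_passport_batch_to_tuple passport_batch → Spec_passport_batch_to_tuple passport_batch (passport_batch_to_tuple passport_batch)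

-- ===== LEMMAS AND PROOFS =====

-- the pieces produced by split('\n\n'), with the current piece carried forward
def pvPieces : List Char → List Char → List (List Char)
  | [], cur => [cur]
  | [c], cur => [cur ++ [c]]
  | c1 :: c2 :: rest, cur =>
    if c1 = '\n' ∧ c2 = '\n' then cur :: pvPieces rest []
    else pvPieces (c2 :: rest) (cur ++ [c1])
termination_by l _ => l.length

-- replace('\n',' ') acts pointwise
def pvSubst (c : Char) : Char := if c = '\n' then ' ' else c

lemma pvReplaceGo_eq (fuel : Nat) :
    ∀ (l acc : List Char), l.length ≤ fuel →
      PySem.Chars.replace.go ['\n'] [' '] fuel l acc = acc.reverse ++ l.map pvSubst := by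
  induction fuel with
  | zero =>
    intro l acc h
    have : l = [] := by cases l <;> simp_all
    subst this; simp [PySem.Chars.replace.go]
  | succ n ih =>
    intro l acc h
    cases l with
    | nil => simp [PySem.Chars.replace.go]
    | cons c t =>
      by_cases hc : c = '\n'
      · subst hc
        have hp : ['\n'].isPrefixOf ('\n' :: t) = true := by simp [List.isPrefixOf]
        simp only [PySem.Chars.replace.go, hp, if_pos]
        rw [ih _ _ (by simpa using Nat.le_of_succ_le_succ h)]
        simp [pvSubst]
      · have hp : ['\n'].isPrefixOf (c :: t) = false := by
          simpa [List.isPrefixOf] using Ne.symm hc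
        simp only [PySem.Chars.replace.go, hp]
        rw [if_neg (by simp), ih _ _ (by simpa using Nat.le_of_succ_le_succ h)]
        simp [pvSubst, hc]

lemma pvReplace_eq (l : List Char) :
    PySem.Chars.replace l ['\n'] [' '] = l.map pvSubst := by
  simp only [PySem.Chars.replace]
  rw [if_neg (by simp)]
  simpa using pvReplaceGo_eq l.length l [] (le_refl _)

lemma pvSplitGo_eq (fuel : Nat) :
    ∀ (l cg : List Char) (acc : List (List Char)), l.length ≤ fuel →
      PySem.Chars.splitOn.go ['\n', '\n'] fuel l cg acc
        = acc.reverse ++ pvPieces l cg.reverse := by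
  induction fuel with
  | zero =>
    intro l cg acc h
    have : l = [] := by cases l <;> simp_all
    subst this
    have h0 : PySem.Chars.splitOn.go ['\n', '\n'] 0 [] cg acc
        = ((cg.reverse ++ []) :: acc).reverse := rfl
    rw [h0]
    simp [pvPieces]
  | succ n ih =>
    intro l cg acc h
    cases l with
    | nil =>
      have h0 : PySem.Chars.splitOn.go ['\n', '\n'] (n + 1) [] cg acc
          = (cg.reverse :: acc).reverse := rfl
      rw [h0]
      simp [pvPieces]
    | cons c rest =>
      by_cases hp : ['\n', '\n'].isPrefixOf (c :: rest) = true
      · obtain ⟨c2, rest', rfl⟩ : ∃ c2 rest', rest = c2 :: rest' := by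
          cases rest with
          | nil => simp [List.isPrefixOf] at hp
          | cons a b => exact ⟨a, b, rfl⟩
        have hc : c = '\n' ∧ c2 = '\n' := by
          have h2 := hp
          simp only [List.isPrefixOf, Bool.and_eq_true, beq_iff_eq] at h2
          exact ⟨h2.1.symm, h2.2.1.symm⟩
        simp only [PySem.Chars.splitOn.go, hp, if_pos]
        rw [ih _ _ _ (by simp at h ⊢; omega)]
        simp [pvPieces, hc.1, hc.2]
      · simp only [PySem.Chars.splitOn.go, hp]
        rw [if_neg (by simp), ih _ _ _ (by simpa using Nat.le_of_succ_le_succ h)]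
        have hstep : pvPieces (c :: rest) cg.reverse
            = pvPieces rest (cg.reverse ++ [c]) := by
          cases rest with
          | nil => simp [pvPieces]
          | cons c2 r2 =>
            have : ¬ (c = '\n' ∧ c2 = '\n') := by
              intro ⟨h1, h2⟩
              exact hp (by simp [List.isPrefixOf, h1, h2])
            simp [pvPieces, this]
        simp [hstep]

lemma pvSplit_eq (l : List Char) :
    PySem.Chars.splitOn l ['\n', '\n'] = pvPieces l [] := by
  simp only [PySem.Chars.splitOn]
  simpa using pvSplitGo_eq (l.length + 1) l [] [] (by omega)

def pvG (p : List Char) : String := String.ofList (PySem.Chars.strip (p.map pvSubst))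

def pvPend (run : Nat) : List Char := if run = 1 then ['\n'] else []

lemma pvLoop_eq :
    ∀ (l : List Char) (out : List String) (cur : List Char) (run : Nat), run ≤ 1 →
      pvAltFinal (l.foldl pvAltStep (out, cur.map pvSubst, run))
        = out ++ ((pvPieces (pvPend run ++ l) cur).filter (fun p => p ≠ [])).map pvG := by
  intro l
  induction l with
  | nil =>
    intro out cur run hrun
    interval_cases run
    · by_cases h : cur = []
      · subst h; simp [pvAltFinal, pvPend, pvPieces]
      · simp [pvAltFinal, pvPend, pvPieces, h, pvG]
    · have : (cur ++ ['\n']).map pvSubst = cur.map pvSubst ++ [' '] := by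
        simp [pvSubst]
      simp [pvAltFinal, pvPend, pvPieces, pvG, this]
  | cons c rest ih =>
    intro out cur run hrun
    by_cases hc : c = '\n'
    · subst hc
      interval_cases run
      · -- run 0 → 1, pending newline
        have hstep : pvAltStep (out, cur.map pvSubst, 0) '\n' = (out, cur.map pvSubst, 1) := by
          simp [pvAltStep]
        simp only [List.foldl_cons, hstep]
        rw [ih out cur 1 (by omega)]
        simp [pvPend]
      · -- run 1 → 2: flush piece
        have hstep : pvAltStep (out, cur.map pvSubst, 1) '\n'
            = (if cur.map pvSubst ≠ [] then
                out ++ [String.ofList (PySem.Chars.strip (cur.map pvSubst))] else out, [], 0) := by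
          simp [pvAltStep]
        simp only [List.foldl_cons, hstep]
        have ih0 := ih (if cur.map pvSubst ≠ [] then
            out ++ [String.ofList (PySem.Chars.strip (cur.map pvSubst))] else out) [] 0 (by omega)
        simp only [List.map_nil] at ih0
        rw [ih0]
        have hpp : pvPieces (pvPend 1 ++ '\n' :: rest) cur = cur :: pvPieces rest [] := by
          simp [pvPend, pvPieces]
        rw [hpp]
        by_cases h : cur = []
        · simp [h, pvPend]
        · simp [h, pvPend, pvG]
    · -- c is not a newline
      have hpieces : ∀ rest' cur', pvPieces (c :: rest') cur' = pvPieces rest' (cur' ++ [c]) := by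
        intro rest' cur'
        cases rest' with
        | nil => simp [pvPieces]
        | cons c2 r2 => simp [pvPieces, hc]
      interval_cases run
      · have hstep : pvAltStep (out, cur.map pvSubst, 0) c = (out, cur.map pvSubst ++ [c], 0) := by
          simp [pvAltStep, hc]
        have hmap : cur.map pvSubst ++ [c] = (cur ++ [c]).map pvSubst := by
          simp [pvSubst, hc]
        simp only [List.foldl_cons, hstep, hmap]
        rw [ih out (cur ++ [c]) 0 (by omega)]
        simp [pvPend, hpieces]
      · have hstep : pvAltStep (out, cur.map pvSubst, 1) c = (out, cur.map pvSubst ++ [' ', c], 0) := by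
          simp [pvAltStep, hc]
        have hmap : cur.map pvSubst ++ [' ', c] = (cur ++ ['\n', c]).map pvSubst := by
          simp [pvSubst, hc]
        simp only [List.foldl_cons, hstep, hmap]
        rw [ih out (cur ++ ['\n', c]) 0 (by omega)]
        have : pvPieces ('\n' :: c :: rest) cur = pvPieces rest (cur ++ ['\n', c]) := by
          rw [show pvPieces ('\n' :: c :: rest) cur = pvPieces (c :: rest) (cur ++ ['\n']) by
            simp [pvPieces, hc], hpieces]
          simp
        simp [pvPend, this]

-- ===== VERDICT (by name: the statement is the Claim_ definition above) =====
theorem passport_batch_to_tuple_spec : Claim_equal_passport_batch_to_tuple := by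
  intro s _hdom
  unfold Spec_passport_batch_to_tuple passport_batch_to_tuple passport_batch_to_tuple_alt
  have hB := pvLoop_eq s.toList [] [] 0 (by omega)
  simp only [List.map_nil, pvPend, if_neg (by omega : ¬ (0:Nat) = 1), List.nil_append] at hB
  rw [hB, pvSplit_eq]
  simp [pvG, pvReplace_eq]
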